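-- pv_equiv track=rewrite | github.com/ddppddpp/bgchof | build/lib/calculateEasterSunday.py | _calculateMonthAndLineNumber
-- ===== SOURCE A (Python) =====
-- def _calculateMonthAndLineNumber(inputYear):
--
--     # result
--     monthAndLineNumber = []
--
--     aprilList19 = [15, 4, 12, 1, 9, 17, 6, 14, 3, 11, 0, 8, 16, 5, 13, 2, 10]
--
--     mayList19 = [13, 2, 10, 18, 7]
--
--     # edge case: if ramainder is 13 or 2 it is a member of both
--
--     remainder19 = inputYear % 19
--
--     for i in aprilList19:
--         if i == remainder19:
--             monthAndLineNumber.append(4)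
--             monthAndLineNumber.append(aprilList19.index(i))
--             return monthAndLineNumber
--     for j in mayList19:
--         if j == remainder19:
--             monthAndLineNumber.append(5)
--             monthAndLineNumber.append(mayList19.index(j))
--             return monthAndLineNumber
-- ===== SOURCE B (Python) =====
-- def _calculateMonthAndLineNumber(inputYear):
--     # The April table is the arithmetic progression (15 + 8*i) % 19, i = 0..16,
--     # so its index is recovered in closed form: i = 12*(r-15) % 19 (12 = 8^-1 mod 19).
--     # Residues whose formula gives 17 or 18 are the May-only residues 18 and 7;
--     # the May table continues the same progression from 13, so its index is 12*(r-13) % 19.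
--     r = inputYear % 19
--     aprilLine = (12 * (r - 15)) % 19
--     if aprilLine < 17:
--         return [4, aprilLine]
--     return [5, (12 * (r - 13)) % 19]
-- ===== Notes on version B (the rewrite author's own statement) =====
-- stated objective: simpler
-- what changed: Replaces A's linear scans over the two hard-coded tables (plus a second .index scan on each hit) with a closed-form modular formula: the tables are arithmetic progressions mod 19, so the line index is recovered directly via the modular inverse 12 of 8 mod 19.
import Mathlib
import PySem

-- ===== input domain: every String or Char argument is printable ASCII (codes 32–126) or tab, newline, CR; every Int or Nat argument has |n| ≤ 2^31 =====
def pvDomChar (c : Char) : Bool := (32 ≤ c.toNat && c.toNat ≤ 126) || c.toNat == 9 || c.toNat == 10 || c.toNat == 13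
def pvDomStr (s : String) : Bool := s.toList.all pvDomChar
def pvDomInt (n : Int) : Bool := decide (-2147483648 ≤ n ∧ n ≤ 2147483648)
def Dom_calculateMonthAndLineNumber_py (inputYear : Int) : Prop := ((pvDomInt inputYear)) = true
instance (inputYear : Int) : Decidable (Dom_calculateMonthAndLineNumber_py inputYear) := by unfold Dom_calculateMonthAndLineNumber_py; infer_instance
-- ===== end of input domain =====

-- B replaces A's two table scans plus .index calls with a closed-form modular formula (objective: simpler).

-- ===== PORT A =====
-- A's table constants
def pvAprilList19 : List Int := [15, 4, 12, 1, 9, 17, 6, 14, 3, 11, 0, 8, 16, 5, 13, 2, 10]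
def pvMayList19 : List Int := [13, 2, 10, 18, 7]

-- 'for i in lst: if i == r: return [month, lst.index(i)]' — scan, and on a hit look the index up with .index
def pvScanA (xs full : List Int) (r month : Int) : Option (List Int) :=
  match xs with
  | [] => none
  | i :: rest =>
      if i = r then some [month, ((PySem.List.index? full i).getD 0 : Nat)]
      else pvScanA rest full r month

def calculateMonthAndLineNumber_py (inputYear : Int) : List Int :=
  let remainder19 := PySem.Int.mod inputYear 19
  match pvScanA pvAprilList19 pvAprilList19 remainder19 4 with
  | some out => out
  | none =>
      match pvScanA pvMayList19 pvMayList19 remainder19 5 with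
      | some out => out
      | none => []   -- Python's implicit 'return None'; unreachable: every residue mod 19 is in one of the tables

-- ===== PORT B =====
def calculateMonthAndLineNumber_py_alt (inputYear : Int) : List Int :=
  let r := PySem.Int.mod inputYear 19
  let aprilLine := PySem.Int.mod (12 * (r - 15)) 19
  if aprilLine < 17 then [4, aprilLine]
  else [5, PySem.Int.mod (12 * (r - 13)) 19]

-- ===== PRECONDITION & SPEC =====
def Spec_calculateMonthAndLineNumber_py (inputYear : Int) (out : List Int) : Prop := out = calculateMonthAndLineNumber_py_alt inputYear
instance (inputYear : Int) (out : List Int) : Decidable (Spec_calculateMonthAndLineNumber_py inputYear out) := by unfold Spec_calculateMonthAndLineNumber_py; infer_instance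

-- ===== CLAIM (what is proved, stated in full; the proofs are below) =====
def Claim_equal_calculateMonthAndLineNumber_py : Prop := ∀ (inputYear : Int), Dom_calculateMonthAndLineNumber_py inputYear → Spec_calculateMonthAndLineNumber_py inputYear (calculateMonthAndLineNumber_py inputYear)

-- ===== LEMMAS AND PROOFS =====

-- both ports are functions of the residue r = inputYear % 19; on each of the 19 residues they agree
theorem pv_agree_on_residue (r : Int) (h0 : 0 ≤ r) (h1 : r < 19) :
    (match pvScanA pvAprilList19 pvAprilList19 r 4 with
     | some out => out
     | none =>
        match pvScanA pvMayList19 pvMayList19 r 5 with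
        | some out => out
        | none => []) =
    (let aprilLine := PySem.Int.mod (12 * (r - 15)) 19
     if aprilLine < 17 then [4, aprilLine]
     else [5, PySem.Int.mod (12 * (r - 13)) 19]) := by
  interval_cases r <;> decide

-- ===== VERDICT (by name: the statement is the Claim_ definition above) =====
theorem calculateMonthAndLineNumber_py_spec : Claim_equal_calculateMonthAndLineNumber_py := by
  intro y _
  have h0 : 0 ≤ PySem.Int.mod y 19 := PySem.Int.mod_nonneg y (by norm_num)
  have h1 : PySem.Int.mod y 19 < 19 := PySem.Int.mod_lt y (by norm_num)
  unfold Spec_calculateMonthAndLineNumber_py calculateMonthAndLineNumber_py calculateMonthAndLineNumber_py_alt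
  exact pv_agree_on_residue _ h0 h1
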